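-- pv_equiv track=rewrite | github.com/mickhornung-oss/local-image-ai | python/identity_transfer_adapter.py | derive_error_state
-- ===== SOURCE A (Python) =====
-- READINESS_ONLY_BLOCKERS = {
--     "missing_identity_head_reference",
--     "missing_target_body_image",
-- }
--
-- BLOCKER_ERROR_MESSAGES = {
--     "identity_transfer_store_unavailable": "The V6.3.1 role store is not accessible.",
--     "missing_identity_head_reference": "The required identity_head_reference image is missing.",
--     "missing_target_body_image": "The required target_body_image image is missing.",
--     "missing_identity_transfer_file": "A stored V6.3.1 role points to a missing image file.",
--     "invalid_identity_transfer_metadata": "Stored V6.3.1 role metadata is incomplete or inconsistent.",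
--     "invalid_identity_transfer_image": "A stored V6.3.1 role does not contain a valid image.",
-- }
--
-- def derive_error_state(blockers: list[str]) -> tuple[str, str | None, str | None]:
--     if not blockers:
--         return "ok", None, None
--
--     prioritized_blockers = [
--         "identity_transfer_store_unavailable",
--         "missing_identity_transfer_file",
--         "invalid_identity_transfer_metadata",
--         "invalid_identity_transfer_image",
--         "missing_identity_head_reference",
--         "missing_target_body_image",
--     ]
--     selected_blocker = next((blocker for blocker in prioritized_blockers if blocker in blockers), blockers[0])
--     status = "ok" if set(blockers).issubset(READINESS_ONLY_BLOCKERS) else "error"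
--     return status, selected_blocker, BLOCKER_ERROR_MESSAGES.get(selected_blocker)
-- ===== SOURCE B (Python) =====
-- READINESS_ONLY_BLOCKERS = {
--     "missing_identity_head_reference",
--     "missing_target_body_image",
-- }
--
-- BLOCKER_ERROR_MESSAGES = {
--     "identity_transfer_store_unavailable": "The V6.3.1 role store is not accessible.",
--     "missing_identity_head_reference": "The required identity_head_reference image is missing.",
--     "missing_target_body_image": "The required target_body_image image is missing.",
--     "missing_identity_transfer_file": "A stored V6.3.1 role points to a missing image file.",
--     "invalid_identity_transfer_metadata": "Stored V6.3.1 role metadata is incomplete or inconsistent.",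
--     "invalid_identity_transfer_image": "A stored V6.3.1 role does not contain a valid image.",
-- }
--
-- _PRIORITY_RANK = {
--     "identity_transfer_store_unavailable": 0,
--     "missing_identity_transfer_file": 1,
--     "invalid_identity_transfer_metadata": 2,
--     "invalid_identity_transfer_image": 3,
--     "missing_identity_head_reference": 4,
--     "missing_target_body_image": 5,
-- }
--
-- def derive_error_state(blockers: list[str]) -> tuple[str, str | None, str | None]:
--     if not blockers:
--         return "ok", None, None
--     unknown = len(_PRIORITY_RANK)
--     best = blockers[0]
--     best_rank = _PRIORITY_RANK.get(best, unknown)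
--     for b in blockers[1:]:
--         r = _PRIORITY_RANK.get(b, unknown)
--         if r < best_rank:
--             best, best_rank = b, r
--     status = "ok" if all(b in READINESS_ONLY_BLOCKERS for b in blockers) else "error"
--     return status, best, BLOCKER_ERROR_MESSAGES.get(best)
-- ===== Notes on version B (the rewrite author's own statement) =====
-- stated objective: alternative
-- what changed: Replaces A's scan over the fixed priority list with 'blocker in blockers' membership tests (and a set-subset status check) by a single pass over the input that tracks the minimum priority rank via a rank dictionary, with an all() membership status check.
import Mathlib
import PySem

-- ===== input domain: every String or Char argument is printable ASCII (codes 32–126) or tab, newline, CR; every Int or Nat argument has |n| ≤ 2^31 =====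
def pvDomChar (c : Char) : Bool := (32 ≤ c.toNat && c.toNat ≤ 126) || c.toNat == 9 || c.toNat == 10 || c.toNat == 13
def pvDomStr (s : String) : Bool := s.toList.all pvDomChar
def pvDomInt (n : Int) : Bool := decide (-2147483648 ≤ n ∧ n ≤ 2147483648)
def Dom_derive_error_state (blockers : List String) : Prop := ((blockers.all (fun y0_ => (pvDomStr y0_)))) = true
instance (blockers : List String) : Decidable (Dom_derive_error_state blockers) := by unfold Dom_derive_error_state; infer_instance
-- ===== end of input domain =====

set_option maxRecDepth 4000


-- B replaces A's scan over the priority list (membership test per priority) by one pass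
-- over the input tracking the minimum priority rank from a rank dictionary; alternative decomposition.

-- shared module-level constants
def pvReadiness : PySem.Set String :=
  PySem.Set.ofList ["missing_identity_head_reference", "missing_target_body_image"]

def pvMessages : PySem.Dict String String := PySem.Dict.ofList
  [("identity_transfer_store_unavailable", "The V6.3.1 role store is not accessible."),
   ("missing_identity_head_reference", "The required identity_head_reference image is missing."),
   ("missing_target_body_image", "The required target_body_image image is missing."),
   ("missing_identity_transfer_file", "A stored V6.3.1 role points to a missing image file."),
   ("invalid_identity_transfer_metadata", "Stored V6.3.1 role metadata is incomplete or inconsistent."),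
   ("invalid_identity_transfer_image", "A stored V6.3.1 role does not contain a valid image.")]

-- ===== PORT A =====
def derive_error_state (blockers : List String) : String × Option String × Option String :=
  match blockers with
  | [] => ("ok", none, none)
  | b0 :: _ =>
    let prioritized := ["identity_transfer_store_unavailable", "missing_identity_transfer_file",
      "invalid_identity_transfer_metadata", "invalid_identity_transfer_image",
      "missing_identity_head_reference", "missing_target_body_image"]
    let selected := (prioritized.find? (fun blocker => blockers.contains blocker)).getD b0
    let status := if PySem.Set.issubset (PySem.Set.ofList blockers) pvReadiness then "ok" else "error"
    (status, some selected, PySem.Dict.get? pvMessages selected)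

-- ===== PORT B =====
-- B-side helper: the module-level _PRIORITY_RANK dict
def pvPriorityRank : PySem.Dict String Int := PySem.Dict.ofList
  [("identity_transfer_store_unavailable", 0),
   ("missing_identity_transfer_file", 1),
   ("invalid_identity_transfer_metadata", 2),
   ("invalid_identity_transfer_image", 3),
   ("missing_identity_head_reference", 4),
   ("missing_target_body_image", 5)]

def derive_error_state_alt (blockers : List String) : String × Option String × Option String :=
  match blockers with
  | [] => ("ok", none, none)
  | b0 :: rest =>
    let unknown : Int := (PySem.Dict.size pvPriorityRank : Int)
    let init : String × Int := (b0, PySem.Dict.getD pvPriorityRank b0 unknown)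
    let best := (rest.foldl (fun (acc : String × Int) b =>
        let r := PySem.Dict.getD pvPriorityRank b unknown
        if r < acc.2 then (b, r) else acc) init).1
    let status := if blockers.all (fun b => PySem.Set.contains pvReadiness b) then "ok" else "error"
    (status, some best, PySem.Dict.get? pvMessages best)

-- ===== PRECONDITION & SPEC =====
def Spec_derive_error_state (blockers : List String) (out : String × Option String × Option String) : Prop := out = derive_error_state_alt blockers
instance (blockers : List String) (out : String × Option String × Option String) : Decidable (Spec_derive_error_state blockers out) := by unfold Spec_derive_error_state; infer_instance

-- ===== CLAIM (what is proved, stated in full; the proofs are below) =====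
def Claim_equal_derive_error_state : Prop := ∀ (blockers : List String), Dom_derive_error_state blockers → Spec_derive_error_state blockers (derive_error_state blockers)

-- ===== LEMMAS AND PROOFS =====

-- helper definitions for the proofs
def pvP0 : String := "identity_transfer_store_unavailable"
def pvP1 : String := "missing_identity_transfer_file"
def pvP2 : String := "invalid_identity_transfer_metadata"
def pvP3 : String := "invalid_identity_transfer_image"
def pvP4 : String := "missing_identity_head_reference"
def pvP5 : String := "missing_target_body_image"

def pvRk (b : String) : Int := PySem.Dict.getD pvPriorityRank b 6

def pvPrioAt (i : Int) : String :=
  if i = 0 then pvP0 else if i = 1 then pvP1 else if i = 2 then pvP2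
  else if i = 3 then pvP3 else if i = 4 then pvP4 else if i = 5 then pvP5 else ""

def pvMmin (a : Int) (l : List String) : Int := l.foldl (fun acc x => min acc (pvRk x)) a

theorem getD_eq_rk (b : String) : PySem.Dict.getD pvPriorityRank b 6 = pvRk b := rfl

theorem rk_of_ne (b : String)
    (h : b ∉ [pvP0, pvP1, pvP2, pvP3, pvP4, pvP5]) : pvRk b = 6 := by
  have hk : pvPriorityRank.keys = [pvP0, pvP1, pvP2, pvP3, pvP4, pvP5] := by decide
  have hn : pvPriorityRank.get? b = none := by
    rw [PySem.Dict.get?_eq_none_iff_not_mem_keys, hk]; exact h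
  simp [pvRk, PySem.Dict.getD_eq_get?_getD, hn]

theorem rk_eq (b : String) : pvRk b =
    if b = pvP0 then 0 else if b = pvP1 then 1 else if b = pvP2 then 2
    else if b = pvP3 then 3 else if b = pvP4 then 4 else if b = pvP5 then 5 else 6 := by
  by_cases h0 : b = pvP0
  · subst h0; decide
  by_cases h1 : b = pvP1
  · subst h1; decide
  by_cases h2 : b = pvP2
  · subst h2; decide
  by_cases h3 : b = pvP3
  · subst h3; decide
  by_cases h4 : b = pvP4
  · subst h4; decide
  by_cases h5 : b = pvP5
  · subst h5; decide
  simp only [if_neg h0, if_neg h1, if_neg h2, if_neg h3, if_neg h4, if_neg h5]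
  exact rk_of_ne b (by simp [h0, h1, h2, h3, h4, h5])

theorem rk_nonneg (b : String) : 0 ≤ pvRk b := by
  rw [rk_eq]; split_ifs <;> omega

theorem rk_le6 (b : String) : pvRk b ≤ 6 := by
  rw [rk_eq]; split_ifs <;> omega

theorem rk_lt_imp (b : String) (h : pvRk b < 6) : pvPrioAt (pvRk b) = b := by
  have e := rk_eq b
  split_ifs at e with h0 h1 h2 h3 h4 h5
  · rw [e, show pvPrioAt 0 = pvP0 from rfl, h0]
  · rw [e, show pvPrioAt 1 = pvP1 from rfl, h1]
  · rw [e, show pvPrioAt 2 = pvP2 from rfl, h2]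
  · rw [e, show pvPrioAt 3 = pvP3 from rfl, h3]
  · rw [e, show pvPrioAt 4 = pvP4 from rfl, h4]
  · rw [e, show pvPrioAt 5 = pvP5 from rfl, h5]
  · omega

theorem mmin_cons (a : Int) (x : String) (l : List String) :
    pvMmin a (x :: l) = pvMmin (min a (pvRk x)) l := rfl

theorem mmin_le_init (l : List String) : ∀ a, pvMmin a l ≤ a := by
  induction l with
  | nil => intro a; exact le_refl a
  | cons x l ih =>
    intro a
    calc pvMmin a (x :: l) = pvMmin (min a (pvRk x)) l := rfl
      _ ≤ min a (pvRk x) := ih _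
      _ ≤ a := min_le_left _ _

theorem mmin_nonneg (l : List String) : ∀ a, 0 ≤ a → 0 ≤ pvMmin a l := by
  induction l with
  | nil => intro a ha; exact ha
  | cons x l ih =>
    intro a ha
    rw [mmin_cons]
    exact ih _ (le_min ha (rk_nonneg x))

theorem mmin_le_mem (l : List String) : ∀ a x, x ∈ l → pvMmin a l ≤ pvRk x := by
  induction l with
  | nil => intro a x hx; cases hx
  | cons y l ih =>
    intro a x hx
    rw [mmin_cons]
    rcases List.mem_cons.mp hx with h | h
    · subst h
      calc pvMmin (min a (pvRk x)) l ≤ min a (pvRk x) := mmin_le_init _ _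
        _ ≤ pvRk x := min_le_right _ _
    · exact ih _ _ h

theorem mmin_cases (l : List String) : ∀ a, pvMmin a l = a ∨ ∃ x ∈ l, pvMmin a l = pvRk x := by
  induction l with
  | nil => intro a; exact Or.inl rfl
  | cons y l ih =>
    intro a
    rw [mmin_cons]
    rcases ih (min a (pvRk y)) with h | ⟨x, hx, he⟩
    · rcases min_cases a (pvRk y) with ⟨hm, _⟩ | ⟨hm, _⟩
      · exact Or.inl (h.trans hm)
      · exact Or.inr ⟨y, List.mem_cons_self .., h.trans hm⟩
    · exact Or.inr ⟨x, List.mem_cons_of_mem _ hx, he⟩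

theorem fold_spec (l : List String) : ∀ best : String,
    l.foldl (fun (acc : String × Int) b =>
        if pvRk b < acc.2 then (b, pvRk b) else acc) (best, pvRk best)
      = (if pvMmin (pvRk best) l < pvRk best then pvPrioAt (pvMmin (pvRk best) l) else best,
         pvMmin (pvRk best) l) := by
  induction l with
  | nil =>
    intro best
    simp [pvMmin]
  | cons x l ih =>
    intro best
    rw [List.foldl_cons, mmin_cons]
    by_cases hx : pvRk x < pvRk best
    · have hmin : min (pvRk best) (pvRk x) = pvRk x := min_eq_right hx.le
      rw [hmin]
      have hle : pvMmin (pvRk x) l ≤ pvRk x := mmin_le_init _ _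
      have hcond : pvMmin (pvRk x) l < pvRk best := lt_of_le_of_lt hle hx
      rw [if_pos hcond]
      simp only [if_pos hx]
      rw [ih x]
      by_cases h2 : pvMmin (pvRk x) l < pvRk x
      · rw [if_pos h2]
      · have he : pvMmin (pvRk x) l = pvRk x := le_antisymm hle (not_lt.mp h2)
        rw [if_neg h2, he, rk_lt_imp x (lt_of_lt_of_le hx (rk_le6 best))]
    · have hmin : min (pvRk best) (pvRk x) = pvRk best := min_eq_left (not_lt.mp hx)
      rw [hmin]
      simp only [if_neg hx]
      exact ih best

def pvPrios : List String := [pvP0, pvP1, pvP2, pvP3, pvP4, pvP5]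

theorem rk_prio0 : pvRk pvP0 = 0 := by decide
theorem rk_prio1 : pvRk pvP1 = 1 := by decide
theorem rk_prio2 : pvRk pvP2 = 2 := by decide
theorem rk_prio3 : pvRk pvP3 = 3 := by decide
theorem rk_prio4 : pvRk pvP4 = 4 := by decide
theorem rk_prio5 : pvRk pvP5 = 5 := by decide

theorem find_spec (l : List String) :
    pvPrios.find? (fun p => l.contains p)
      = if pvMmin 6 l < 6 then some (pvPrioAt (pvMmin 6 l)) else none := by
  have hub : pvMmin 6 l ≤ 6 := mmin_le_init l 6
  have hlb : 0 ≤ pvMmin 6 l := mmin_nonneg l 6 (by omega)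
  have hlem : ∀ x ∈ l, pvMmin 6 l ≤ pvRk x := mmin_le_mem l 6
  have hin : pvMmin 6 l < 6 → pvPrioAt (pvMmin 6 l) ∈ l := by
    intro h6
    rcases mmin_cases l 6 with h | ⟨x, hx, he⟩
    · omega
    · rw [he] at h6 ⊢
      rw [rk_lt_imp x h6]; exact hx
  set m := pvMmin 6 l with hm
  interval_cases m
  · have h := hin (by omega)
    rw [show pvPrioAt 0 = pvP0 from rfl] at h
    simp [pvPrios, List.contains_eq_mem, pvPrioAt, h]
  · have h := hin (by omega)
    rw [show pvPrioAt 1 = pvP1 from rfl] at h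
    have n0 : pvP0 ∉ l := fun hc => by have := hlem _ hc; rw [rk_prio0] at this; omega
    simp [pvPrios, List.find?, List.contains_eq_mem, pvPrioAt, n0, h]
  · have h := hin (by omega)
    rw [show pvPrioAt 2 = pvP2 from rfl] at h
    have n0 : pvP0 ∉ l := fun hc => by have := hlem _ hc; rw [rk_prio0] at this; omega
    have n1 : pvP1 ∉ l := fun hc => by have := hlem _ hc; rw [rk_prio1] at this; omega
    simp [pvPrios, List.find?, List.contains_eq_mem, pvPrioAt, n0, n1, h]
  · have h := hin (by omega)
    rw [show pvPrioAt 3 = pvP3 from rfl] at h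
    have n0 : pvP0 ∉ l := fun hc => by have := hlem _ hc; rw [rk_prio0] at this; omega
    have n1 : pvP1 ∉ l := fun hc => by have := hlem _ hc; rw [rk_prio1] at this; omega
    have n2 : pvP2 ∉ l := fun hc => by have := hlem _ hc; rw [rk_prio2] at this; omega
    simp [pvPrios, List.find?, List.contains_eq_mem, pvPrioAt, n0, n1, n2, h]
  · have h := hin (by omega)
    rw [show pvPrioAt 4 = pvP4 from rfl] at h
    have n0 : pvP0 ∉ l := fun hc => by have := hlem _ hc; rw [rk_prio0] at this; omega
    have n1 : pvP1 ∉ l := fun hc => by have := hlem _ hc; rw [rk_prio1] at this; omega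
    have n2 : pvP2 ∉ l := fun hc => by have := hlem _ hc; rw [rk_prio2] at this; omega
    have n3 : pvP3 ∉ l := fun hc => by have := hlem _ hc; rw [rk_prio3] at this; omega
    simp [pvPrios, List.find?, List.contains_eq_mem, pvPrioAt, n0, n1, n2, n3, h]
  · have h := hin (by omega)
    rw [show pvPrioAt 5 = pvP5 from rfl] at h
    have n0 : pvP0 ∉ l := fun hc => by have := hlem _ hc; rw [rk_prio0] at this; omega
    have n1 : pvP1 ∉ l := fun hc => by have := hlem _ hc; rw [rk_prio1] at this; omega
    have n2 : pvP2 ∉ l := fun hc => by have := hlem _ hc; rw [rk_prio2] at this; omega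
    have n3 : pvP3 ∉ l := fun hc => by have := hlem _ hc; rw [rk_prio3] at this; omega
    have n4 : pvP4 ∉ l := fun hc => by have := hlem _ hc; rw [rk_prio4] at this; omega
    simp [pvPrios, List.find?, List.contains_eq_mem, pvPrioAt, n0, n1, n2, n3, n4, h]
  · have n0 : pvP0 ∉ l := fun hc => by have := hlem _ hc; rw [rk_prio0] at this; omega
    have n1 : pvP1 ∉ l := fun hc => by have := hlem _ hc; rw [rk_prio1] at this; omega
    have n2 : pvP2 ∉ l := fun hc => by have := hlem _ hc; rw [rk_prio2] at this; omega
    have n3 : pvP3 ∉ l := fun hc => by have := hlem _ hc; rw [rk_prio3] at this; omega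
    have n4 : pvP4 ∉ l := fun hc => by have := hlem _ hc; rw [rk_prio4] at this; omega
    have n5 : pvP5 ∉ l := fun hc => by have := hlem _ hc; rw [rk_prio5] at this; omega
    simp [pvPrios, List.find?, List.contains_eq_mem, n0, n1, n2, n3, n4, n5]

theorem status_eq (l : List String) :
    PySem.Set.issubset (PySem.Set.ofList l) pvReadiness
      = l.all (fun b => PySem.Set.contains pvReadiness b) := by
  rw [Bool.eq_iff_iff, PySem.Set.issubset_iff, List.all_eq_true]
  constructor
  · intro h b hb
    simp only [PySem.Set.contains, List.contains_eq_mem, decide_eq_true_eq]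
    exact h b (by simp [PySem.Set.mem_ofList, hb])
  · intro h b hb
    have := h b (by simpa [PySem.Set.mem_ofList] using hb)
    simpa [PySem.Set.contains, List.contains_eq_mem] using this

theorem sel_eq (b0 : String) (rest : List String) :
    (pvPrios.find? (fun p => (b0 :: rest).contains p)).getD b0
      = (rest.foldl (fun (acc : String × Int) b =>
          if pvRk b < acc.2 then (b, pvRk b) else acc) (b0, pvRk b0)).1 := by
  rw [find_spec, fold_spec]
  have h1 : pvMmin 6 (b0 :: rest) = pvMmin (pvRk b0) rest := by
    rw [mmin_cons, min_eq_right (rk_le6 b0)]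
  rw [h1]
  set m := pvMmin (pvRk b0) rest with hm
  have hle : m ≤ pvRk b0 := mmin_le_init rest (pvRk b0)
  have h6 : pvRk b0 ≤ 6 := rk_le6 b0
  by_cases hlt : m < pvRk b0
  · rw [if_pos hlt, if_pos (by omega)]; simp
  · have he : m = pvRk b0 := le_antisymm hle (not_lt.mp hlt)
    rw [if_neg hlt]
    by_cases h66 : m < 6
    · rw [if_pos h66]
      simp only [Option.getD_some]
      rw [he, rk_lt_imp b0 (he ▸ h66)]
    · rw [if_neg h66]; simp

-- ===== VERDICT (by name: the statement is the Claim_ definition above) =====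
theorem derive_error_state_spec : Claim_equal_derive_error_state := by
  intro blockers _
  unfold Spec_derive_error_state
  cases blockers with
  | nil => rfl
  | cons b0 rest =>
    simp only [derive_error_state, derive_error_state_alt]
    rw [show ["identity_transfer_store_unavailable", "missing_identity_transfer_file",
      "invalid_identity_transfer_metadata", "invalid_identity_transfer_image",
      "missing_identity_head_reference", "missing_target_body_image"] = pvPrios from rfl]
    rw [show ((PySem.Dict.size pvPriorityRank : Int)) = (6 : Int) from by decide]
    simp only [getD_eq_rk]
    rw [status_eq, sel_eq b0 rest]
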